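-- pv_equiv track=rewrite | github.com/spsree4u/MySolvings | dynamic_programming/div_by_6.py | count_div_by_6
-- ===== SOURCE A (Python) =====
-- def f(i, m, s, visited):
--     count = 0
--     if i == len(s):
--         return 0
--     if visited[i][m] != -1:
--         return visited[i][m]
--     x = ord(s[i]) - ord('0')
--     count += (((x + m) % 3 == 0)
--               and (x % 2 == 0)) + f(i+1, (x+m) % 3, s, visited)
--     visited[i][m] = count
--     return count
--
-- def count_div_by_6(s):
--     n = len(s)
--     visited = [[-1] * 3 for _ in range(n+1)]
--     count = 0
--     for i in range(n):
--         if s[i] == '0':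
--             count += 1
--         else:
--             count += f(i, 0, s, visited)
--     return count
-- ===== SOURCE B (Python) =====
-- def count_div_by_6(s):
--     count = 0
--     h = [0, 0, 0]
--     for c in reversed(s):
--         x = ord(c) - 48
--         even = x % 2 == 0
--         h = [(1 if even and (x + m) % 3 == 0 else 0) + h[(x + m) % 3] for m in range(3)]
--         count += 1 if c == '0' else h[0]
--     return count
-- ===== Notes on version B (the rewrite author's own statement) =====
-- stated objective: faster
-- what changed: Replaces the top-down memoized recursion f(i,m) with an O(n+1)-by-3 visited table and a per-start call by a single backward pass keeping just three rolling values g[m] (the count for each carried residue m), accumulating the answer in the same sweep.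
import Mathlib
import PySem

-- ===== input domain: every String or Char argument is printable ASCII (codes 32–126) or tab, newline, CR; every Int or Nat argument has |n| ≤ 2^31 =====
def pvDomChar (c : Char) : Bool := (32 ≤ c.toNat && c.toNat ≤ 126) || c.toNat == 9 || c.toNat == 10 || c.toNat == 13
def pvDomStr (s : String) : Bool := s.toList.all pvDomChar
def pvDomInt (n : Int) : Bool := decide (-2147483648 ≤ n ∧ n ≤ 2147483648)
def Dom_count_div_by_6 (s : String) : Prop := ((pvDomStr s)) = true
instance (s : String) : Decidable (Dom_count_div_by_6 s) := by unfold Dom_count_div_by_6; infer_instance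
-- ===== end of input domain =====

-- B replaces A's memoized (position, residue) recursion and O(n)-by-3 table with a single
-- backward pass keeping three rolling residue counts (objective: faster, constant-factor, O(1) space).


-- ===== PORT A =====
-- helper f(i, m, s, visited); the memo table is threaded through as state.
def fA (cs : List Char) (i : Nat) (m : Int) (vis : List (List Int)) : Int × List (List Int) :=
  -- Python's guard is `i == len(s)`; every call keeps i ≤ len(s), where ≤ coincides with =
  -- (the ≤ form only makes the Lean recursion total).
  if _h : cs.length ≤ i then (0, vis)
  else
    -- visited[i][m]; m is 0 or a `% 3` result, so 0 ≤ m and toNat is exact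
    let cached := (vis.getD i []).getD m.toNat (-1)
    if cached ≠ -1 then (cached, vis)
    else
      let x : Int := ((cs.getD i ' ').toNat : Int) - 48  -- ord(s[i]) - ord('0'); i < len(s) here
      let r := fA cs (i + 1) (PySem.Int.mod (x + m) 3) vis
      let count := (if PySem.Int.mod (x + m) 3 = 0 ∧ PySem.Int.mod x 2 = 0 then (1 : Int) else 0) + r.1
      (count, r.2.set i ((r.2.getD i []).set m.toNat count))
  termination_by cs.length - i
  decreasing_by omega

def count_div_by_6 (s : String) : Int :=
  let cs := s.toList
  let n := cs.length
  let vis0 : List (List Int) := List.replicate (n + 1) (List.replicate 3 (-1))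
  ((List.range n).foldl (fun (st : Int × List (List Int)) i =>
      if cs.getD i ' ' = '0' then (st.1 + 1, st.2)
      else
        let r := fA cs i 0 st.2
        (st.1 + r.1, r.2)) (0, vis0)).1

-- ===== PORT B =====
def count_div_by_6_alt (s : String) : Int :=
  -- for c in reversed(s), state (count, h); h[(x+m)%3] is indexed by a `% 3` result,
  -- which is in [0,3), so toNat is exact
  ((s.toList.reverse).foldl (fun (st : Int × List Int) c =>
      let x : Int := (c.toNat : Int) - 48
      let even := PySem.Int.mod x 2 = 0
      let h := (List.range 3).map (fun (m : Nat) =>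
          (if even ∧ PySem.Int.mod (x + (m : Int)) 3 = 0 then (1 : Int) else 0)
            + st.2.getD (PySem.Int.mod (x + (m : Int)) 3).toNat 0)
      (st.1 + (if c = '0' then 1 else h.getD 0 0), h))
    (0, [0, 0, 0])).1

-- ===== PRECONDITION & SPEC =====
def Spec_count_div_by_6 (s : String) (out : Int) : Prop := out = count_div_by_6_alt s
instance (s : String) (out : Int) : Decidable (Spec_count_div_by_6 s out) := by unfold Spec_count_div_by_6; infer_instance

-- ===== CLAIM (what is proved, stated in full; the proofs are below) =====
def Claim_equal_count_div_by_6 : Prop := ∀ (s : String), Dom_count_div_by_6 s → Spec_count_div_by_6 s (count_div_by_6 s)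

-- ===== LEMMAS AND PROOFS =====

-- the mathematical value both programs compute for a start index i and carried residue m:
-- number of j ≥ i with (digitsum s[i..j] + m) % 3 == 0 and s[j] even, written recursively.
def g (cs : List Char) (i : Nat) (m : Int) : Int :=
  if _h : cs.length ≤ i then 0
  else
    let x : Int := ((cs.getD i ' ').toNat : Int) - 48
    (if PySem.Int.mod (x + m) 3 = 0 ∧ PySem.Int.mod x 2 = 0 then (1 : Int) else 0)
      + g cs (i + 1) (PySem.Int.mod (x + m) 3)
  termination_by cs.length - i
  decreasing_by omega

-- memo-table invariant: every stored entry is -1 or the correct value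
def MemoInv (cs : List Char) (vis : List (List Int)) : Prop :=
  ∀ i m : Nat, (vis.getD i []).getD m (-1) = -1 ∨ (vis.getD i []).getD m (-1) = g cs i (m : Int)

lemma mod3_nonneg (a : Int) : 0 ≤ PySem.Int.mod a 3 := by
  rw [PySem.Int.mod_eq_emod_of_pos (by norm_num)]
  exact Int.emod_nonneg a (by norm_num)

lemma getD_set {α : Type} (l : List α) (i j : Nat) (v d : α) :
    (l.set i v).getD j d = if j = i ∧ i < l.length then v else l.getD j d := by
  simp only [List.getD_eq_getElem?_getD, List.getElem?_set]
  split_ifs with h1 h2 h3 h4 <;> simp_all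

lemma fA_correct (cs : List Char) :
    ∀ k i m vis, cs.length - i ≤ k → 0 ≤ m → MemoInv cs vis →
      (fA cs i m vis).1 = g cs i m ∧ MemoInv cs (fA cs i m vis).2 := by
  intro k
  induction k with
  | zero =>
      intro i m vis hk hm hinv
      have hle : cs.length ≤ i := by omega
      rw [fA, g]
      simp only [dif_pos hle]
      exact ⟨trivial, hinv⟩
  | succ k ih =>
      intro i m vis hk hm hinv
      by_cases hle : cs.length ≤ i
      · rw [fA, g]
        simp only [dif_pos hle]
        exact ⟨trivial, hinv⟩
      · rw [fA]
        simp only [dif_neg hle]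
        by_cases hne : (vis.getD i []).getD m.toNat (-1) = -1
        · -- cache miss: recurse
          simp only [hne, ne_eq, not_true_eq_false, if_false]
          have hrec := ih (i + 1)
            (PySem.Int.mod (((cs.getD i ' ').toNat : Int) - 48 + m) 3) vis (by omega)
            (mod3_nonneg _) hinv
          have hcount : (if PySem.Int.mod (((cs.getD i ' ').toNat : Int) - 48 + m) 3 = 0 ∧
                PySem.Int.mod (((cs.getD i ' ').toNat : Int) - 48) 2 = 0 then (1 : Int) else 0) +
              (fA cs (i + 1) (PySem.Int.mod (((cs.getD i ' ').toNat : Int) - 48 + m) 3) vis).1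
              = g cs i m := by
            rw [hrec.1]
            conv_rhs => rw [g]
            simp only [dif_neg hle]
          refine ⟨hcount, ?_⟩
          intro i' m'
          rw [getD_set]
          by_cases hii : i' = i ∧
              i < (fA cs (i + 1) (PySem.Int.mod (((cs.getD i ' ').toNat : Int) - 48 + m) 3) vis).2.length
          · rw [if_pos hii, getD_set]
            by_cases hmm : m' = m.toNat ∧ m.toNat <
                ((fA cs (i + 1) (PySem.Int.mod (((cs.getD i ' ').toNat : Int) - 48 + m) 3) vis).2.getD i []).length
            · rw [if_pos hmm]
              right
              rw [hii.1, hmm.1, Int.toNat_of_nonneg hm]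
              exact hcount
            · rw [if_neg hmm, hii.1]
              exact hrec.2 i m'
          · rw [if_neg hii]
            exact hrec.2 i' m'
        · -- cache hit
          simp only [hne, ne_eq, not_false_eq_true, if_true]
          rcases hinv i m.toNat with hc | hc
          · exact absurd hc hne
          · refine ⟨?_, hinv⟩
            rw [hc, Int.toNat_of_nonneg hm]

lemma mod3_lt (a : Int) : PySem.Int.mod a 3 < 3 := by
  rw [PySem.Int.mod_eq_emod_of_pos (by norm_num)]
  exact Int.emod_lt_of_pos a (by norm_num)

lemma getD3 (a b c r : Int) (h0 : 0 ≤ r) (h3 : r < 3) :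
    ([a, b, c].getD r.toNat 0) = if r = 0 then a else if r = 1 then b else c := by
  interval_cases r <;> simp

-- A's outer loop accumulates the per-start contributions
lemma outerA (cs : List Char) :
    ∀ (l : List Nat) (c : Int) (vis : List (List Int)), MemoInv cs vis →
      ((l.foldl (fun (st : Int × List (List Int)) i =>
          if cs.getD i ' ' = '0' then (st.1 + 1, st.2)
          else
            let r := fA cs i 0 st.2
            (st.1 + r.1, r.2)) (c, vis)).1
        = c + (l.map (fun i => if cs.getD i ' ' = '0' then (1 : Int) else g cs i 0)).sum) := by
  intro l
  induction l with
  | nil => intro c vis _; simp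
  | cons i l ihl =>
      intro c vis hinv
      rw [List.foldl_cons, List.map_cons, List.sum_cons]
      have hfa := fA_correct cs cs.length i 0 vis (by omega) le_rfl hinv
      by_cases h0 : cs.getD i ' ' = '0'
      · simp only [h0, if_true]
        rw [ihl (c + 1) vis hinv]
        ring
      · simp only [if_neg h0]
        rw [ihl _ _ hfa.2, hfa.1]
        ring

-- B's backward pass: after consuming the suffix starting at i, h holds (g i 0, g i 1, g i 2)
-- and count holds the total contribution of all starts in [i, n)
lemma Bsuffix (cs : List Char) :
    ∀ (k i : Nat), i + k = cs.length →
      ((cs.drop i).foldr (fun c (st : Int × List Int) =>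
          let x : Int := (c.toNat : Int) - 48
          let even := PySem.Int.mod x 2 = 0
          let h := (List.range 3).map (fun (m : Nat) =>
              (if even ∧ PySem.Int.mod (x + (m : Int)) 3 = 0 then (1 : Int) else 0)
                + st.2.getD (PySem.Int.mod (x + (m : Int)) 3).toNat 0)
          (st.1 + (if c = '0' then 1 else h.getD 0 0), h))
        (0, [0, 0, 0]))
      = (((List.range' i k).map
            (fun j => if cs.getD j ' ' = '0' then (1 : Int) else g cs j 0)).sum,
         [g cs i 0, g cs i 1, g cs i 2]) := by
  intro k
  induction k with
  | zero =>
      intro i hi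
      rw [List.drop_eq_nil_of_le (by omega), List.foldr_nil]
      rw [g, g, g]
      simp [dif_pos (by omega : cs.length ≤ i)]
  | succ k ih =>
      intro i hi
      have hlt : i < cs.length := by omega
      have hdrop : cs.drop i = cs.getD i ' ' :: cs.drop (i + 1) := by
        rw [List.getD_eq_getElem?_getD, List.getElem?_eq_getElem hlt]
        exact List.drop_eq_getElem_cons hlt
      rw [hdrop, List.foldr_cons, ih (i + 1) (by omega)]
      have hg : ∀ m : Int,
          ([g cs (i + 1) 0, g cs (i + 1) 1, g cs (i + 1) 2].getD
              (PySem.Int.mod ((((cs.getD i ' ').toNat : Int) - 48) + m) 3).toNat 0)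
            = g cs (i + 1) (PySem.Int.mod ((((cs.getD i ' ').toNat : Int) - 48) + m) 3) := by
        intro m
        rw [getD3 _ _ _ _ (mod3_nonneg _) (mod3_lt _)]
        split_ifs with h1 h2
        · rw [h1]
        · rw [h2]
        · congr 1
          have h0 := mod3_nonneg ((((cs.getD i ' ').toNat : Int) - 48) + m)
          have h3 := mod3_lt ((((cs.getD i ' ').toNat : Int) - 48) + m)
          omega
      have hgm : ∀ m : Int,
          (if PySem.Int.mod (((cs.getD i ' ').toNat : Int) - 48) 2 = 0 ∧
              PySem.Int.mod ((((cs.getD i ' ').toNat : Int) - 48) + m) 3 = 0 then (1 : Int) else 0)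
            + g cs (i + 1) (PySem.Int.mod ((((cs.getD i ' ').toNat : Int) - 48) + m) 3)
            = g cs i m := by
        intro m
        conv_rhs => rw [g]
        simp only [dif_neg (by omega : ¬ cs.length ≤ i)]
        congr 1
        exact if_congr and_comm rfl rfl
      have hh : (List.range 3).map (fun (m : Nat) =>
            (if PySem.Int.mod (((cs.getD i ' ').toNat : Int) - 48) 2 = 0 ∧
                PySem.Int.mod ((((cs.getD i ' ').toNat : Int) - 48) + (m : Int)) 3 = 0
              then (1 : Int) else 0)
              + [g cs (i + 1) 0, g cs (i + 1) 1, g cs (i + 1) 2].getD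
                  (PySem.Int.mod ((((cs.getD i ' ').toNat : Int) - 48) + (m : Int)) 3).toNat 0)
          = [g cs i 0, g cs i 1, g cs i 2] := by
        rw [show List.range 3 = [0, 1, 2] from rfl]
        simp only [List.map_cons, List.map_nil, Nat.cast_zero, Nat.cast_one, Nat.cast_ofNat]
        rw [hg 0, hg 1, hg 2, hgm 0, hgm 1, hgm 2]
      simp only []
      rw [hh, List.range'_succ, List.map_cons, List.sum_cons, Prod.mk.injEq]
      refine ⟨?_, rfl⟩
      by_cases h0 : cs.getD i ' ' = '0'
      · simp only [h0, if_true]; omega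
      · simp only [if_neg h0]
        simp only [List.getD, List.getElem?_cons_zero, Option.getD_some]
        omega

lemma memoinv_init (cs : List Char) (n : Nat) :
    MemoInv cs (List.replicate (n + 1) (List.replicate 3 (-1))) := by
  intro i m
  left
  simp only [List.getD_eq_getElem?_getD, List.getElem?_replicate]
  split_ifs with h
  · rcases m with _ | _ | _ | m <;> simp
  · simp

-- ===== VERDICT (by name: the statement is the Claim_ definition above) =====
theorem count_div_by_6_spec : Claim_equal_count_div_by_6 := by
  intro s _
  unfold Spec_count_div_by_6 count_div_by_6 count_div_by_6_alt
  simp only [List.foldl_reverse]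
  rw [outerA s.toList (List.range s.toList.length) 0 _ (memoinv_init s.toList s.toList.length)]
  have hB := Bsuffix s.toList s.toList.length 0 (by omega)
  rw [List.drop_zero] at hB
  simp only [] at hB
  rw [hB, List.range_eq_range']
  omega
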